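-- pv_equiv track=rewrite | github.com/MrBrantCode/unitest_baseline | mut_generate/mist_train_cf/cf_54633/solution.py | square_integers
-- ===== SOURCE A (Python) =====
-- def square_integers(arr):
--     results = []
--     seen = set()
--     for i, num in enumerate(arr):
--         abs_val = abs(num)
--         if abs_val in seen:
--             results.append(0)
--         else:
--             results.append(abs_val**2)
--             seen.add(abs_val)
--     return results
-- ===== SOURCE B (Python) =====
-- def square_integers(arr):
--     first = {}
--     for i, num in enumerate(arr):
--         first.setdefault(abs(num), i)
--     return [num * num if first[abs(num)] == i else 0 for i, num in enumerate(arr)]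
-- ===== Notes on version B (the rewrite author's own statement) =====
-- stated objective: alternative
-- what changed: Replaces the single incremental pass with a growing seen-set by two separated passes: first build a full abs-value -> first-occurrence-index table with setdefault, then emit num*num exactly at those stored indices.
import Mathlib
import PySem

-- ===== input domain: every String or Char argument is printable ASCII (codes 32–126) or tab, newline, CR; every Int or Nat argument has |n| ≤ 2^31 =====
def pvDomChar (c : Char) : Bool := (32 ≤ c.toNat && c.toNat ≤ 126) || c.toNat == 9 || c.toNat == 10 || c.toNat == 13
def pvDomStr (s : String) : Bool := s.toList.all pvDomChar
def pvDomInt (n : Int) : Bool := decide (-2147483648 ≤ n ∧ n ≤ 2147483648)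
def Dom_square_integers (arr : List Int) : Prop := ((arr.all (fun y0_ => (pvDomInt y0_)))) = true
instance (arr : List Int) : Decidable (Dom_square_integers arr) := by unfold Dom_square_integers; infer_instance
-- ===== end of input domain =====

-- B replaces A's incremental seen-set pass by two separated passes (a setdefault-built
-- first-occurrence index table, then an emission pass comparing indices); same results.

-- ===== PORT A =====
def square_integers (arr : List Int) : List Int :=
  ((PySem.List.enumerate arr).foldl
    (fun (st : List Int × PySem.Set Int) (p : Int × Int) =>
      let abs_val : Int := |p.2|
      if PySem.Set.contains st.2 abs_val then
        (st.1 ++ [(0 : Int)], st.2)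
      else
        (st.1 ++ [abs_val ^ 2], PySem.Set.add st.2 abs_val))
    ([], PySem.Set.empty)).1

-- ===== PORT B =====
def square_integers_alt (arr : List Int) : List Int :=
  let first : PySem.Dict Int Int :=
    (PySem.List.enumerate arr).foldl (fun d p => d.setdefault |p.2| p.1) PySem.Dict.empty
  (PySem.List.enumerate arr).map
    (fun p => if first.get? |p.2| = some p.1 then p.2 * p.2 else 0)

-- ===== PRECONDITION & SPEC =====
def Spec_square_integers (arr : List Int) (out : List Int) : Prop := out = square_integers_alt arr
instance (arr : List Int) (out : List Int) : Decidable (Spec_square_integers arr out) := by unfold Spec_square_integers; infer_instance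

-- ===== CLAIM (what is proved, stated in full; the proofs are below) =====
def Claim_equal_square_integers : Prop := ∀ (arr : List Int), Dom_square_integers arr → Spec_square_integers arr (square_integers arr)

-- ===== LEMMAS AND PROOFS =====

-- reference form of A's loop output: only seen-membership matters, not the index
def goA (seen : PySem.Set Int) : List Int → List Int
  | [] => []
  | x :: xs =>
      if PySem.Set.contains seen |x| then 0 :: goA seen xs
      else |x| ^ 2 :: goA (PySem.Set.add seen |x|) xs

lemma foldA_eq (l : List Int) : ∀ (s : Int) (res : List Int) (seen : PySem.Set Int),
    ((PySem.List.enumerate l s).foldl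
      (fun (st : List Int × PySem.Set Int) (p : Int × Int) =>
        let abs_val : Int := |p.2|
        if PySem.Set.contains st.2 abs_val then
          (st.1 ++ [(0 : Int)], st.2)
        else
          (st.1 ++ [abs_val ^ 2], PySem.Set.add st.2 abs_val))
      (res, seen)).1 = res ++ goA seen l := by
  induction l with
  | nil => intro s res seen; simp [PySem.List.enumerate_nil, goA]
  | cons x xs ih =>
    intro s res seen
    rw [PySem.List.enumerate_cons, List.foldl_cons]
    by_cases h : PySem.Set.contains seen |x|
    · simp only [h, if_true, goA, ih]
      simp
    · simp only [h, goA, ih]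
      simp

-- a key already present is never overwritten by the setdefault loop
lemma build_stable (l : List (Int × Int)) : ∀ (d : PySem.Dict Int Int) (a : Int),
    d.contains a = true →
    (l.foldl (fun d p => d.setdefault |p.2| p.1) d).get? a = d.get? a := by
  induction l with
  | nil => intro d a _; rfl
  | cons p rest ih =>
    intro d a h
    rw [List.foldl_cons]
    by_cases hk : a = |p.2|
    · subst hk
      rw [PySem.Dict.setdefault_of_contains d p.1 h]
      exact ih d _ h
    · rw [ih _ a (by rw [PySem.Dict.contains_setdefault]; simp [h]),
        PySem.Dict.get?_setdefault_of_ne d p.1 hk]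

lemma main_eq (l : List Int) : ∀ (s : Int) (d : PySem.Dict Int Int) (seen : PySem.Set Int),
    (∀ a, PySem.Set.contains seen a = d.contains a) →
    (∀ a v, d.get? a = some v → v < s) →
    goA seen l = (PySem.List.enumerate l s).map
      (fun p =>
        if ((PySem.List.enumerate l s).foldl (fun d p => d.setdefault |p.2| p.1) d).get? |p.2|
            = some p.1 then p.2 * p.2 else 0) := by
  induction l with
  | nil => intro s d seen _ _; simp [PySem.List.enumerate_nil, goA]
  | cons x xs ih =>
    intro s d seen hc hv
    rw [PySem.List.enumerate_cons, List.map_cons, List.foldl_cons]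
    by_cases h : PySem.Set.contains seen |x|
    · have hd : d.contains |x| = true := by rw [← hc]; exact h
      rw [show ((s,x).1) = s from rfl, show ((s,x).2) = x from rfl] at *
      rw [PySem.Dict.setdefault_of_contains d s hd]
      have hget : ((PySem.List.enumerate xs (s+1)).foldl
          (fun d p => d.setdefault |p.2| p.1) d).get? |x| = d.get? |x| :=
        build_stable _ d _ hd
      have hne : ¬ (((PySem.List.enumerate xs (s+1)).foldl
          (fun d p => d.setdefault |p.2| p.1) d).get? |x| = some s) := by
        rw [hget]
        intro hs
        exact absurd (hv _ _ hs) (lt_irrefl s)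
      rw [goA]
      simp only [h, if_true, hne, if_false]
      congr 1
      exact ih (s+1) d seen hc (fun a v hav => lt_trans (hv a v hav) (by omega))
    · have hd : d.contains |x| = false := by rw [← hc]; simpa using h
      rw [show ((s,x).1) = s from rfl, show ((s,x).2) = x from rfl] at *
      rw [PySem.Dict.setdefault_of_not_contains d s hd]
      have hget : ((PySem.List.enumerate xs (s+1)).foldl
          (fun d p => d.setdefault |p.2| p.1) (d.insert |x| s)).get? |x|
          = some s := by
        rw [build_stable _ _ _ (PySem.Dict.contains_insert_self _ _ _),
          PySem.Dict.get?_insert_self]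
      rw [goA]
      simp only [h, hget, if_true, Bool.false_eq_true, if_false]
      have hsq : |x| ^ 2 = x * x := by rw [sq_abs]; ring
      rw [hsq]
      congr 1
      refine ih (s+1) (d.insert |x| s) (PySem.Set.add seen |x|) ?_ ?_
      · intro a
        rw [PySem.Dict.contains_insert]
        by_cases ha : a = |x|
        · subst ha
          simp [PySem.Set.contains, PySem.Set.mem_add]
        · have h2 := hc a
          simp only [PySem.Set.contains, List.contains_eq_mem] at h2 ⊢
          simp [PySem.Set.mem_add, ha, h2]
      · intro a v hav
        rw [PySem.Dict.get?_insert d _ a s] at hav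
        by_cases ha : a = |x|
        · simp [ha] at hav; omega
        · rw [if_neg ha] at hav
          exact lt_trans (hv a v hav) (by omega)

-- ===== VERDICT (by name: the statement is the Claim_ definition above) =====
theorem square_integers_spec : Claim_equal_square_integers := by
  intro arr _
  show square_integers arr = square_integers_alt arr
  unfold square_integers square_integers_alt
  rw [foldA_eq]
  rw [main_eq arr 0 PySem.Dict.empty PySem.Set.empty
    (by intro a; simp [PySem.Set.empty, PySem.Set.contains, PySem.Dict.contains_empty])
    (by intro a v hav; rw [PySem.Dict.get?_empty] at hav; cases hav)]
  simp
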